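-- pv_equiv track=rewrite | github.com/mrnoobx/AniwatchTvdl | cantarella/scraper/megacloud.py | _shuffle_sources
-- ===== SOURCE A (Python) =====
-- def _shuffle_sources(sources: list[str], key: str) -> list[str]:
--     if not key: return sources
--     array_count = len(sources) // len(key)
--     arrays = [[""] * len(key) for _ in range(array_count)]
--     key_dict = {i: char for i, char in enumerate(key)}
--     key_sorted = {i: char for i, char in sorted(key_dict.items(), key=lambda p: p[1])}
--     p = 0
--     for idx in key_sorted.keys():
--         for arr_idx in range(array_count):
--             if p < len(sources):
--                 arrays[arr_idx][idx] = sources[p]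
--                 p += 1
--     res = []
--     for arr in arrays: res.extend(arr)
--     return res
-- ===== SOURCE B (Python) =====
-- def _shuffle_sources(sources: list[str], key: str) -> list[str]:
--     if not key:
--         return sources
--     k = len(key)
--     m = len(sources) // k
--     perm = [i for i, _ in sorted(enumerate(key), key=lambda p: p[1])]
--     rank = [0] * k
--     for s, c in enumerate(perm):
--         rank[c] = s
--     return [sources[rank[j % k] * m + j // k] for j in range(m * k)]
-- ===== Notes on version B (the rewrite author's own statement) =====
-- stated objective: simpler
-- what changed: Instead of allocating an m-by-k grid, filling it column-by-column in sorted-key order by mutation and flattening, B computes the sorted column permutation, inverts it into a rank array, and emits the result directly with one comprehension via the index map j -> sources[rank[j%k]*m + j//k].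
import Mathlib
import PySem

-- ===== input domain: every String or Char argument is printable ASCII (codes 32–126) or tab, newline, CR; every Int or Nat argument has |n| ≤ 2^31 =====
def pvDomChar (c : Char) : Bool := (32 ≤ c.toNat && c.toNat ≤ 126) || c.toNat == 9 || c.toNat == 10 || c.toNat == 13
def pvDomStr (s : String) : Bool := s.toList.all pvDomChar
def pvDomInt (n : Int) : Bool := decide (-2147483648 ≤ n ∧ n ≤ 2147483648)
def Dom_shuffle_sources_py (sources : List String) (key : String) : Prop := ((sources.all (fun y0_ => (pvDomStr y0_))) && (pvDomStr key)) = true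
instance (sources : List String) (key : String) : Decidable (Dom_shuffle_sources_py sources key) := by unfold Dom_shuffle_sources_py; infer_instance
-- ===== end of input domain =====

-- B replaces A's mutable grid-fill-and-flatten by a rank array and a single index-mapping comprehension (simpler decomposition, same cost).


-- ===== PORT A =====
-- len(sources) // len(key) on two Nat lengths is Nat division (PySem.Int.floordiv_natCast).
-- {i: char for i, char in enumerate(key)} has distinct keys in insertion order, so its items
-- are exactly enumerate(key); the dict rebuilt from the sorted items keeps the sorted order.
def shuffle_sources_py (sources : List String) (key : String) : List String :=
  if key.toList = [] then sources else
    let array_count : Nat := sources.length / key.toList.length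
    let arrays : List (List String) :=
      List.replicate array_count (List.replicate key.toList.length "")
    let key_dict : List (Int × Char) := PySem.List.enumerate key.toList 0
    let key_sorted : List (Int × Char) := PySem.List.sorted key_dict (fun p => p.2) false
    let st := key_sorted.foldl (fun (st : List (List String) × Int) pr =>
        (PySem.List.pyRange 0 (array_count : Int) 1).foldl (fun st2 r =>
          if st2.2 < (sources.length : Int) then
            (PySem.List.pySetD st2.1 r
               (PySem.List.pySetD (PySem.List.pyGetD st2.1 r []) pr.1
                  (PySem.List.pyGetD sources st2.2 "")),
             st2.2 + 1)
          else st2) st) (arrays, (0 : Int))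
    st.1.foldl (fun acc arr => acc ++ arr) []

-- ===== PORT B =====
def shuffle_sources_py_alt (sources : List String) (key : String) : List String :=
  if key.toList = [] then sources else
    let k : Nat := key.toList.length
    let m : Nat := sources.length / k
    let perm : List Int :=
      (PySem.List.sorted (PySem.List.enumerate key.toList 0) (fun p => p.2) false).map
        (fun p => p.1)
    let rank : List Int := (PySem.List.enumerate perm 0).foldl
        (fun rk sc => PySem.List.pySetD rk sc.2 sc.1) (List.replicate k (0 : Int))
    (PySem.List.pyRange 0 ((m * k : Nat) : Int) 1).map (fun j =>
      PySem.List.pyGetD sources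
        (PySem.List.pyGetD rank (PySem.Int.mod j (k : Int)) 0 * (m : Int)
          + PySem.Int.floordiv j (k : Int)) "")

-- ===== PRECONDITION & SPEC =====
def Spec_shuffle_sources_py (sources : List String) (key : String) (out : List String) : Prop := out = shuffle_sources_py_alt sources key
instance (sources : List String) (key : String) (out : List String) : Decidable (Spec_shuffle_sources_py sources key out) := by unfold Spec_shuffle_sources_py; infer_instance

-- ===== CLAIM (what is proved, stated in full; the proofs are below) =====
def Claim_equal_shuffle_sources_py : Prop := ∀ (sources : List String) (key : String), Dom_shuffle_sources_py sources key → Spec_shuffle_sources_py sources key (shuffle_sources_py sources key)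

-- ===== LEMMAS AND PROOFS =====

-- A's `res.extend(arr)` loop is foldl-append; it produces the flatten.
lemma pv_foldl_append (l : List (List String)) : ∀ init : List String,
    l.foldl (fun acc arr => acc ++ arr) init = init ++ l.flatten := by
  induction l with
  | nil => simp
  | cons h t ih => intro init; simp [ih, List.append_assoc]

-- What A's inner loop writes: column `idx` of the first `b` rows receives s[p], s[p+1], …
def pvColWrite (s : List String) (idx : Int) (p : Nat) : Nat → List (List String) → List (List String)
  | 0, arrays => arrays
  | b+1, arrays =>
    let prev := pvColWrite s idx p b arrays
    prev.set b (PySem.List.pySetD (prev.getD b []) idx (s.getD (p + b) ""))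

lemma pvColWrite_length (s : List String) (idx : Int) (p b : Nat) (arrays : List (List String)) :
    (pvColWrite s idx p b arrays).length = arrays.length := by
  induction b with
  | zero => rfl
  | succ b ih => simp [pvColWrite, ih]

lemma pv_inner (s : List String) (idx : Int) (b : Nat) : ∀ (arrays : List (List String)) (p : Nat),
    p + b ≤ s.length →
    (PySem.List.pyRange 0 (b:Int) 1).foldl
      (fun st2 r => if st2.2 < (s.length : Int) then
          (PySem.List.pySetD st2.1 r
            (PySem.List.pySetD (PySem.List.pyGetD st2.1 r []) idx (PySem.List.pyGetD s st2.2 "")),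
           st2.2 + 1)
        else st2) (arrays, (p:Int))
      = (pvColWrite s idx p b arrays, ((p + b : Nat) : Int)) := by
  induction b with
  | zero =>
    intro arrays p h
    simp only [Nat.cast_zero]
    rw [PySem.List.pyRange_one_eq_nil (le_refl 0)]
    simp [pvColWrite]
  | succ b ih =>
    intro arrays p h
    have hb : ((b+1 : Nat) : Int) = (b : Int) + 1 := by push_cast; ring
    rw [hb, PySem.List.pyRange_one_succ_right (by exact_mod_cast Nat.zero_le b), List.foldl_append,
      ih arrays p (by omega)]
    simp only [List.foldl_cons, List.foldl_nil]
    have hcond : ((p + b : Nat) : Int) < (s.length : Int) := by exact_mod_cast (by omega : p + b < s.length)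
    rw [if_pos hcond]
    simp only [PySem.List.pySetD_natCast, PySem.List.pyGetD_natCast, pvColWrite, Prod.mk.injEq]
    refine ⟨by trivial, by push_cast; ring⟩

-- What A's outer loop writes: the i-th sorted column index receives block i of the sources.
def pvOutWrite (s : List String) (m : Nat) : Nat → List Int → List (List String) → List (List String)
  | _, [], arrays => arrays
  | p, idx :: t, arrays => pvOutWrite s m (p + m) t (pvColWrite s idx p m arrays)

lemma pv_outer (s : List String) (m : Nat) (pairs : List (Int × Char)) : ∀ (arrays : List (List String)) (p : Nat),
    p + pairs.length * m ≤ s.length →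
    pairs.foldl (fun st pr =>
      (PySem.List.pyRange 0 (m:Int) 1).foldl (fun st2 r =>
        if st2.2 < (s.length : Int) then
          (PySem.List.pySetD st2.1 r
            (PySem.List.pySetD (PySem.List.pyGetD st2.1 r []) pr.1 (PySem.List.pyGetD s st2.2 "")),
           st2.2 + 1)
        else st2) st) (arrays, (p:Int))
    = (pvOutWrite s m p (pairs.map (fun pr => pr.1)) arrays, ((p + pairs.length * m : Nat) : Int)) := by
  induction pairs with
  | nil => intro arrays p h; simp [pvOutWrite]
  | cons hd t ih =>
    intro arrays p h
    have e : (hd :: t).length * m = t.length * m + m := by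
      simp [List.length_cons, Nat.succ_mul]
    rw [e] at h
    have h1 : p + m ≤ s.length := by omega
    have h2 : (p + m) + t.length * m ≤ s.length := by omega
    simp only [List.foldl_cons]
    rw [pv_inner s hd.1 m arrays p h1, ih _ (p + m) h2]
    simp only [List.map_cons, pvOutWrite]
    rw [show (p + m + t.length * m : Nat) = p + (hd :: t).length * m from by rw [e]; omega]

lemma pvColWrite_rows (s : List String) (idx : Int) (p k : Nat) : ∀ (b : Nat) (arrays : List (List String)),
    b ≤ arrays.length → (∀ row ∈ arrays, row.length = k) →
    ∀ row ∈ pvColWrite s idx p b arrays, row.length = k := by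
  intro b
  induction b with
  | zero => intro arrays _ h; exact h
  | succ b ih =>
    intro arrays hb h row hrow
    simp only [pvColWrite] at hrow
    rcases List.mem_or_eq_of_mem_set hrow with h1 | h2
    · exact ih arrays (by omega) h row h1
    · subst h2
      rw [PySem.List.length_pySetD]
      have hblt : b < (pvColWrite s idx p b arrays).length := by rw [pvColWrite_length]; omega
      rw [List.getD_eq_getElem _ _ hblt]
      exact ih arrays (by omega) h _ (List.getElem_mem hblt)

lemma pvColWrite_get (s : List String) (idx : Int) (p k : Nat) (hidx0 : 0 ≤ idx) (hidxk : idx.toNat < k) :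
    ∀ (b : Nat) (arrays : List (List String)), b ≤ arrays.length → (∀ row ∈ arrays, row.length = k) →
    ∀ (r c : Nat), c < k →
    ((pvColWrite s idx p b arrays).getD r []).getD c "" =
      if r < b ∧ c = idx.toNat then s.getD (p + r) "" else ((arrays.getD r []).getD c "") := by
  intro b
  induction b with
  | zero => intro arrays _ _ r c _; simp [pvColWrite]
  | succ b ih =>
    intro arrays hb h r c hc
    simp only [pvColWrite]
    set L := pvColWrite s idx p b arrays with hL
    set w := PySem.List.pySetD (L.getD b []) idx (s.getD (p + b) "") with hw
    have hlen : L.length = arrays.length := pvColWrite_length s idx p b arrays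
    have hblt : b < L.length := by omega
    by_cases hrb : r = b
    · subst hrb
      have hsel : (L.set r w).getD r [] = w := by
        rw [List.getD_eq_getElem?_getD, List.getElem?_set_self hblt]; rfl
      rw [hsel, hw]
      have hrowmem : L.getD r [] ∈ L := by
        rw [List.getD_eq_getElem _ _ hblt]; exact List.getElem_mem hblt
      have hrowlen : (L.getD r []).length = k :=
        pvColWrite_rows s idx p k r arrays (by omega) h _ hrowmem
      rw [PySem.List.pySetD_of_nonneg _ _ hidx0]
      by_cases hci : c = idx.toNat
      · subst hci
        rw [List.getD_eq_getElem?_getD, List.getElem?_set_self (by omega)]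
        simp
      · rw [List.getD_eq_getElem?_getD, List.getElem?_set_ne (fun hh => hci hh.symm),
          ← List.getD_eq_getElem?_getD, ih arrays (by omega) h r c hc]
        simp [hci]
    · have hsel : (L.set b w).getD r [] = L.getD r [] := by
        rw [List.getD_eq_getElem?_getD, List.getElem?_set_ne (fun hh => hrb hh.symm),
          ← List.getD_eq_getElem?_getD]
      rw [hsel, ih arrays (by omega) h r c hc]
      have hiff : (r < b + 1 ∧ c = idx.toNat) ↔ (r < b ∧ c = idx.toNat) := by
        constructor
        · rintro ⟨h1, h2⟩; exact ⟨by omega, h2⟩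
        · rintro ⟨h1, h2⟩; exact ⟨by omega, h2⟩
      rw [if_congr hiff rfl rfl]

lemma pvOutWrite_length (s : List String) (m : Nat) : ∀ (idxs : List Int) (p : Nat) (arrays : List (List String)),
    (pvOutWrite s m p idxs arrays).length = arrays.length := by
  intro idxs
  induction idxs with
  | nil => intro p arrays; rfl
  | cons i t ih => intro p arrays; rw [pvOutWrite, ih, pvColWrite_length]

lemma pvOutWrite_rows (s : List String) (m k : Nat) : ∀ (idxs : List Int) (p : Nat) (arrays : List (List String)),
    arrays.length = m → (∀ row ∈ arrays, row.length = k) →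
    ∀ row ∈ pvOutWrite s m p idxs arrays, row.length = k := by
  intro idxs
  induction idxs with
  | nil => intro p arrays _ h; exact h
  | cons i t ih =>
    intro p arrays hlen h
    exact ih (p+m) _ (by rw [pvColWrite_length]; exact hlen)
      (pvColWrite_rows s i p k m arrays (by omega) h)

lemma pvOutWrite_get (s : List String) (m k : Nat) :
    ∀ (idxs : List Int) (p : Nat) (arrays : List (List String)),
    idxs.Nodup → (∀ x ∈ idxs, 0 ≤ x ∧ x.toNat < k) →
    arrays.length = m → (∀ row ∈ arrays, row.length = k) →
    ∀ (r c : Nat), r < m → c < k →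
    ((pvOutWrite s m p idxs arrays).getD r []).getD c "" =
      if (c : Int) ∈ idxs then s.getD (p + idxs.idxOf (c:Int) * m + r) "" else (arrays.getD r []).getD c "" := by
  intro idxs
  induction idxs with
  | nil => intro p arrays _ _ _ _ r c _ _; simp [pvOutWrite]
  | cons i t ih =>
    intro p arrays hnd hv hlen hrows r c hr hc
    rw [pvOutWrite]
    have hi := hv i List.mem_cons_self
    have hcol_len : (pvColWrite s i p m arrays).length = m := by rw [pvColWrite_length]; exact hlen
    have hcol_rows := pvColWrite_rows s i p k m arrays (by omega) hrows
    rw [ih (p+m) _ (List.Nodup.of_cons hnd) (fun x hx => hv x (List.mem_cons_of_mem _ hx))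
      hcol_len hcol_rows r c hr hc]
    by_cases hct : (c:Int) ∈ t
    · have hne : (c:Int) ≠ i := by
        rintro rfl; exact (List.nodup_cons.mp hnd).1 hct
      rw [if_pos hct, if_pos (List.mem_cons_of_mem _ hct), List.idxOf_cons_ne _ (fun hh => hne hh.symm)]
      congr 1
      simp only [Nat.succ_eq_add_one, Nat.succ_mul]
      omega
    · rw [if_neg hct, pvColWrite_get s i p k hi.1 hi.2 m arrays (by omega) hrows r c hc]
      by_cases hci : (c:Int) = i
      · have hcn : c = i.toNat := by
          rw [← hci]; simp
        rw [if_pos ⟨hr, hcn⟩, if_pos (by rw [hci]; exact List.mem_cons_self), ← hci, List.idxOf_cons_self]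
        simp
      · have hcn : ¬ (c = i.toNat) := by
          intro hh; apply hci; rw [hh, Int.toNat_of_nonneg hi.1]
        rw [if_neg (fun hh => hcn hh.2), if_neg (by simp [hci, hct])]

lemma pv_flatten_len (k : Nat) : ∀ (arrays : List (List String)), (∀ row ∈ arrays, row.length = k) →
    arrays.flatten.length = arrays.length * k := by
  intro arrays
  induction arrays with
  | nil => simp
  | cons row t ih =>
    intro h
    have h1 : row.length = k := h row List.mem_cons_self
    have h2 := ih (fun r hr => h r (List.mem_cons_of_mem _ hr))
    simp [h1, h2, Nat.succ_mul, Nat.add_comm]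

lemma pv_flatten_get (k : Nat) (hk : 0 < k) : ∀ (arrays : List (List String)),
    (∀ row ∈ arrays, row.length = k) →
    ∀ j, j < arrays.length * k →
    arrays.flatten.getD j "" = (arrays.getD (j / k) []).getD (j % k) "" := by
  intro arrays
  induction arrays with
  | nil => intro _ j hj; simp at hj
  | cons row t ih =>
    intro h j hj
    have hrow : row.length = k := h row List.mem_cons_self
    rw [List.flatten_cons]
    by_cases hjk : j < k
    · rw [List.getD_append _ _ _ _ (by omega), Nat.div_eq_of_lt hjk, Nat.mod_eq_of_lt hjk]
      rfl
    · rw [Nat.not_lt] at hjk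
      obtain ⟨j', rfl⟩ : ∃ j', j = j' + k := ⟨j - k, by omega⟩
      rw [List.getD_append_right _ _ _ _ (by omega)]
      have hrw : j' + k - row.length = j' := by omega
      rw [hrw]
      have hj' : j' < t.length * k := by
        have : (row :: t).length * k = t.length * k + k := by
          simp [List.length_cons, Nat.succ_mul]
        omega
      rw [ih (fun r hr => h r (List.mem_cons_of_mem _ hr)) j' hj',
        Nat.add_div_right _ hk, Nat.add_mod_right]
      rfl

lemma pv_rank_get (k : Nat) : ∀ (idxs : List Int) (s0 : Int) (rk : List Int),
    idxs.Nodup → (∀ x ∈ idxs, 0 ≤ x ∧ x.toNat < k) → rk.length = k →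
    ∀ (c : Nat), c < k →
    ((PySem.List.enumerate idxs s0).foldl (fun rk2 sc => PySem.List.pySetD rk2 sc.2 sc.1) rk).getD c 0 =
      if (c:Int) ∈ idxs then s0 + (idxs.idxOf (c:Int) : Int) else rk.getD c 0 := by
  intro idxs
  induction idxs with
  | nil => intro s0 rk _ _ _ c _; simp [PySem.List.enumerate]
  | cons i t ih =>
    intro s0 rk hnd hv hlen c hc
    rw [PySem.List.enumerate_cons, List.foldl_cons]
    have hi := hv i List.mem_cons_self
    have hset : PySem.List.pySetD rk i s0 = rk.set i.toNat s0 := PySem.List.pySetD_of_nonneg rk s0 hi.1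
    simp only [hset]
    rw [ih (s0+1) _ (List.Nodup.of_cons hnd) (fun x hx => hv x (List.mem_cons_of_mem _ hx))
      (by simp [hlen]) c hc]
    by_cases hci : (c:Int) = i
    · have hcn : c = i.toNat := by rw [← hci]; simp
      have hct : (c:Int) ∉ t := by rw [hci]; exact (List.nodup_cons.mp hnd).1
      rw [if_neg hct, if_pos (by rw [hci]; exact List.mem_cons_self), ← hci, List.idxOf_cons_self]
      have hcc : ((c:Int)).toNat = c := by simp
      rw [hcc, List.getD_eq_getElem?_getD, List.getElem?_set_self (by omega)]
      simp
    · have hcn : ¬ (i.toNat = c) := by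
        intro hh; apply hci; rw [← hh, Int.toNat_of_nonneg hi.1]
      rw [List.getD_eq_getElem?_getD, List.getElem?_set_ne hcn, ← List.getD_eq_getElem?_getD]
      by_cases hct : (c:Int) ∈ t
      · rw [if_pos hct, if_pos (List.mem_cons_of_mem _ hct), List.idxOf_cons_ne _ (fun hh => hci hh.symm)]
        push_cast
        ring
      · rw [if_neg hct, if_neg (by simp [hci, hct])]

-- ===== VERDICT (by name: the statement is the Claim_ definition above) =====
theorem shuffle_sources_py_spec : Claim_equal_shuffle_sources_py := by
  intro sources key _hdom
  unfold Spec_shuffle_sources_py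
  by_cases hkey : key.toList = []
  · simp [shuffle_sources_py, shuffle_sources_py_alt, hkey]
  · have hk : 0 < key.toList.length := List.length_pos_iff.mpr hkey
    set ks := key.toList with hks
    set k := ks.length with hkdef
    set n := sources.length with hn
    set m := n / k with hm
    set S := PySem.List.sorted (PySem.List.enumerate ks 0) (fun p => p.2) false with hS
    set idxs := S.map (fun p => p.1) with hidxs
    have hSperm : S.Perm (PySem.List.enumerate ks 0) := PySem.List.sorted_perm _ _ _
    have hidxsperm : idxs.Perm (PySem.List.pyRange 0 (k:Int) 1) := by
      have h1 := hSperm.map (fun p => p.1)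
      rw [PySem.List.map_fst_enumerate] at h1
      simpa using h1
    have hnd : idxs.Nodup := hidxsperm.nodup_iff.mpr (PySem.List.nodup_pyRange_one _ _)
    have hv : ∀ x ∈ idxs, 0 ≤ x ∧ x.toNat < k := by
      intro x hx
      have := PySem.List.mem_pyRange_one.mp (hidxsperm.subset hx)
      omega
    have hSlen : S.length = k := by
      rw [hS, PySem.List.length_sorted, PySem.List.length_enumerate]
    have hbound : 0 + S.length * m ≤ n := by
      rw [hSlen]
      have := Nat.div_mul_le_self n k
      calc 0 + k * m ≤ m * k := by rw [Nat.mul_comm]; omega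
        _ ≤ n := by rw [hm]; exact Nat.div_mul_le_self n k
    have hA0len : (List.replicate m (List.replicate k "")).length = m := List.length_replicate
    have hA0rows : ∀ row ∈ List.replicate m (List.replicate k ""), row.length = k := by
      intro row hrow
      rw [List.eq_of_mem_replicate hrow]
      exact List.length_replicate
    have hFlen : (pvOutWrite sources m 0 idxs (List.replicate m (List.replicate k ""))).length = m := by
      rw [pvOutWrite_length, hA0len]
    have hFrows : ∀ row ∈ pvOutWrite sources m 0 idxs (List.replicate m (List.replicate k "")), row.length = k :=
      pvOutWrite_rows sources m k idxs 0 _ hA0len hA0rows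
    have houter := pv_outer sources m S (List.replicate m (List.replicate k "")) 0 hbound
    simp only [Nat.cast_zero] at houter
    simp only [shuffle_sources_py, shuffle_sources_py_alt, ← hks, if_neg hkey]
    rw [← hn, ← hkdef, ← hm, ← hS, ← hidxs, houter]
    simp only [pv_foldl_append, List.nil_append]
    apply List.ext_getElem
    · rw [pv_flatten_len k _ hFrows, hFlen, List.length_map, PySem.List.length_pyRange_one]
      simp only [Int.sub_zero, Int.toNat_natCast]
    · intro j hj1 hj2
      have hjmk : j < m * k := by
        rw [pv_flatten_len k _ hFrows, hFlen] at hj1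
        exact hj1
      have hrlt : j / k < m := (Nat.div_lt_iff_lt_mul hk).mpr hjmk
      have hclt : j % k < k := Nat.mod_lt _ hk
      have hmem : ((j % k : Nat) : Int) ∈ idxs := by
        refine hidxsperm.mem_iff.mpr (PySem.List.mem_pyRange_one.mpr ⟨by positivity, ?_⟩)
        exact_mod_cast hclt
      rw [← List.getD_eq_getElem _ "" hj1, ← List.getD_eq_getElem _ "" hj2,
        pv_flatten_get k hk _ hFrows j (by rw [hFlen]; exact hjmk),
        pvOutWrite_get sources m k idxs 0 _ hnd hv hA0len hA0rows (j / k) (j % k) hrlt hclt,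
        if_pos hmem]
      rw [List.getD_eq_getElem _ "" hj2, List.getElem_map, PySem.List.getElem_pyRange_one]
      simp only [Int.zero_add, PySem.Int.mod_natCast, PySem.Int.floordiv_natCast,
        PySem.List.pyGetD_natCast]
      rw [pv_rank_get k idxs 0 (List.replicate k 0) hnd hv (by simp) (j % k) hclt, if_pos hmem]
      simp only [Int.zero_add]
      have hcast : (↑(List.idxOf ((j % k : Nat) : Int) idxs) * (m : Int) + ↑(j / k)) =
          ((List.idxOf ((j % k : Nat) : Int) idxs * m + j / k : Nat) : Int) := by push_cast; ring
      rw [hcast, PySem.List.pyGetD_natCast]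
      simp
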